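-- pv_equiv track=rewrite | github.com/malharpandya/CSCA08 | Assignment2/elevation.py | can_hike_to
-- ===== SOURCE A (Python) =====
-- from typing import List
--
-- def can_hike_to(elevation_map: List[List[int]], start: List[int],
--                 dest: List[int], supplies: int) -> bool:
--     """Return True if and only if a hiker can go from start to dest in
--     elevation_map without running out of supplies.
--
--     Precondition: elevation_map is a valid elevation map.
--                   start and dest are valid cells in elevation_map.
--                   dest is North-West of start.
--                   supplies >= 0
--
--     >>> map = [[1, 6, 5, 6],
--     ...        [2, 5, 6, 8],
--     ...        [7, 2, 8, 1],
--     ...        [4, 4, 7, 3]]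
--     >>> can_hike_to(map, [3, 3], [2, 2], 10)
--     True
--     >>> can_hike_to(map, [3, 3], [2, 2], 8)
--     False
--     >>> can_hike_to(map, [3, 3], [3, 0], 7)
--     True
--     >>> can_hike_to(map, [3, 3], [3, 0], 6)
--     False
--     >>> can_hike_to(map, [3, 3], [0, 0], 18)
--     True
--     >>> can_hike_to(map, [3, 3], [0, 0], 17)
--     False
--
--     """
--
--     i, j = start[0], start[1]
--     while i > dest[0] and j > dest[1]:
--         up, left = abs(elevation_map[i - 1][j]), abs(elevation_map[i][j - 1])
--         if up <= left:
--             dif, i = abs(elevation_map[i - 1][j] - elevation_map[i][j]), i - 1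
--         else:
--             dif, j = abs(elevation_map[i][j - 1] - elevation_map[i][j]), j - 1
--         supplies = supplies - dif
--     if i == dest[0]:
--         while j != dest[1]:
--             dif, j = abs(elevation_map[i][j - 1] - elevation_map[i][j]), j - 1
--             supplies = supplies - dif
--     elif j == dest[1]:
--         while i != dest[0]:
--             dif, i = abs(elevation_map[i - 1][j] - elevation_map[i][j]), i - 1
--             supplies = supplies - dif
--     return supplies >= 0
-- ===== SOURCE B (Python) =====
-- def can_hike_to(elevation_map, start, dest, supplies):
--     # Recursive reformulation: one self-recursive cost function replaces A's three
--     # while-loops; it returns the total descent cost, compared against supplies once.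
--     def cost(i, j):
--         if i > dest[0] and j > dest[1]:
--             if abs(elevation_map[i - 1][j]) <= abs(elevation_map[i][j - 1]):
--                 return abs(elevation_map[i - 1][j] - elevation_map[i][j]) + cost(i - 1, j)
--             return abs(elevation_map[i][j - 1] - elevation_map[i][j]) + cost(i, j - 1)
--         if i == dest[0] and j != dest[1]:
--             return abs(elevation_map[i][j - 1] - elevation_map[i][j]) + cost(i, j - 1)
--         if j == dest[1] and i != dest[0]:
--             return abs(elevation_map[i - 1][j] - elevation_map[i][j]) + cost(i - 1, j)
--         return 0
--     return supplies >= cost(start[0], start[1])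
-- ===== Notes on version B (the rewrite author's own statement) =====
-- stated objective: alternative
-- what changed: B replaces A's three imperative while-loops with in-place supply decrementing by a single self-recursive cost function that sums the descent cost bottom-up on return and compares supplies against the total once.
-- outside the precondition, e.g. on can_hike_to([[5], [9, 9, 9], [1, 1, 1]], [2, 2], [0, 0], 12): A returns True, B returns True
import Mathlib
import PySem

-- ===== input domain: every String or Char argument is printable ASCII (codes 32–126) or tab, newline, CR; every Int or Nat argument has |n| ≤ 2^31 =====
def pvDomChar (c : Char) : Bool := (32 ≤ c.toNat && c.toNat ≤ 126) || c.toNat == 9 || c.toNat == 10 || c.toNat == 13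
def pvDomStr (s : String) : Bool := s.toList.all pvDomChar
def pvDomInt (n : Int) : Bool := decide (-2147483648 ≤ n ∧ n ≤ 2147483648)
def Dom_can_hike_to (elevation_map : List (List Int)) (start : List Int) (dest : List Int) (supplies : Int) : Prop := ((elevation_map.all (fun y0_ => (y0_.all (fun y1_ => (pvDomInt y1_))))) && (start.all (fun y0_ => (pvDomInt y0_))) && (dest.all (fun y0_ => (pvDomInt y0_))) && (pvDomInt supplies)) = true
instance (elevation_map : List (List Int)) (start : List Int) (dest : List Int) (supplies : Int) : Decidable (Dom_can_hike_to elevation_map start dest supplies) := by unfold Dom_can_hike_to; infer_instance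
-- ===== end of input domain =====

-- B replaces A's three while-loops (decrementing supplies in place) with one
-- self-recursive cost function that unifies the three movement cases, sums the
-- descent cost on return, and compares it against supplies once.  Objective: alternative.

-- ===== PORT A =====

-- elevation_map[i][j]; `none` (Python IndexError) is excluded by Pre_, so getD 0 is a totality guard only
def getE (m : List (List Int)) (i j : Int) : Int :=
  ((PySem.List.pyGet? m i).bind (fun row => PySem.List.pyGet? row j)).getD 0

-- A's first while loop: `while i > dest[0] and j > dest[1]`; fuel is a totality guard,
-- exact on Pre_ (fuel = (i-d0)+(j-d1) steps suffice since each step decrements i or j)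
def aLoop1 (m : List (List Int)) (d0 d1 : Int) : Nat → Int → Int → Int → Int × Int × Int
  | 0, i, j, s => (i, j, s)
  | fuel + 1, i, j, s =>
    if i > d0 ∧ j > d1 then
      let up := |getE m (i - 1) j|
      let left := |getE m i (j - 1)|
      if up ≤ left then
        aLoop1 m d0 d1 fuel (i - 1) j (s - |getE m (i - 1) j - getE m i j|)
      else
        aLoop1 m d0 d1 fuel i (j - 1) (s - |getE m i (j - 1) - getE m i j|)
    else (i, j, s)

-- A's `while j != dest[1]` loop (westward run); fuel exact on Pre_
def aLoop2 (m : List (List Int)) (d1 i : Int) : Nat → Int → Int → Int × Int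
  | 0, j, s => (j, s)
  | fuel + 1, j, s =>
    if j ≠ d1 then aLoop2 m d1 i fuel (j - 1) (s - |getE m i (j - 1) - getE m i j|)
    else (j, s)

-- A's `while i != dest[0]` loop (northward run); fuel exact on Pre_
def aLoop3 (m : List (List Int)) (d0 j : Int) : Nat → Int → Int → Int × Int
  | 0, i, s => (i, s)
  | fuel + 1, i, s =>
    if i ≠ d0 then aLoop3 m d0 j fuel (i - 1) (s - |getE m (i - 1) j - getE m i j|)
    else (i, s)

def can_hike_to (elevation_map : List (List Int)) (start : List Int) (dest : List Int) (supplies : Int) : Bool :=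
  let i0 := ((PySem.List.pyGet? start 0).getD 0)
  let j0 := ((PySem.List.pyGet? start 1).getD 0)
  let d0 := ((PySem.List.pyGet? dest 0).getD 0)
  let d1 := ((PySem.List.pyGet? dest 1).getD 0)
  let r1 := aLoop1 elevation_map d0 d1 ((i0 - d0).toNat + (j0 - d1).toNat) i0 j0 supplies
  let i := r1.1; let j := r1.2.1; let s := r1.2.2
  if i = d0 then
    decide (0 ≤ (aLoop2 elevation_map d1 i ((j - d1).toNat) j s).2)
  else if j = d1 then
    decide (0 ≤ (aLoop3 elevation_map d0 j ((i - d0).toNat) i s).2)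
  else
    decide (0 ≤ s)

-- ===== PORT B =====

-- B's recursive cost function (`cost(i, j)` in Source B); fuel is a totality guard,
-- exact on Pre_ ((i-d0)+(j-d1) recursive calls reach dest)
def bCost (m : List (List Int)) (d0 d1 : Int) : Nat → Int → Int → Int
  | 0, _, _ => 0
  | fuel + 1, i, j =>
    if i > d0 ∧ j > d1 then
      if |getE m (i - 1) j| ≤ |getE m i (j - 1)| then
        |getE m (i - 1) j - getE m i j| + bCost m d0 d1 fuel (i - 1) j
      else
        |getE m i (j - 1) - getE m i j| + bCost m d0 d1 fuel i (j - 1)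
    else if i = d0 ∧ j ≠ d1 then
      |getE m i (j - 1) - getE m i j| + bCost m d0 d1 fuel i (j - 1)
    else if j = d1 ∧ i ≠ d0 then
      |getE m (i - 1) j - getE m i j| + bCost m d0 d1 fuel (i - 1) j
    else 0

def can_hike_to_alt (elevation_map : List (List Int)) (start : List Int) (dest : List Int) (supplies : Int) : Bool :=
  let i0 := ((PySem.List.pyGet? start 0).getD 0)
  let j0 := ((PySem.List.pyGet? start 1).getD 0)
  let d0 := ((PySem.List.pyGet? dest 0).getD 0)
  let d1 := ((PySem.List.pyGet? dest 1).getD 0)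
  decide (bCost elevation_map d0 d1 ((i0 - d0).toNat + (j0 - d1).toNat) i0 j0 ≤ supplies)

-- ===== PRECONDITION & SPEC =====
-- Pre_ admits (a) the no-move inputs (both coordinates equal to dest's, or both
-- different with dest not strictly NW, so every loop guard is false) and (b) dest
-- weakly North-West of start with every row of the traversed rectangle long enough
-- (the docstring's own precondition); outside Pre_ A raises IndexError, except some
-- ragged maps whose short rows the greedy path happens to avoid, where A and B still
-- return alike (see cites).
def Pre_can_hike_to (elevation_map : List (List Int)) (start : List Int) (dest : List Int) (supplies : Int) : Prop :=
  2 ≤ start.length ∧ 2 ≤ dest.length ∧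
  ((¬(((PySem.List.pyGet? dest 0).getD 0) < ((PySem.List.pyGet? start 0).getD 0) ∧
      ((PySem.List.pyGet? dest 1).getD 0) < ((PySem.List.pyGet? start 1).getD 0)) ∧
    ((((PySem.List.pyGet? start 0).getD 0) ≠ ((PySem.List.pyGet? dest 0).getD 0) ∧
      ((PySem.List.pyGet? start 1).getD 0) ≠ ((PySem.List.pyGet? dest 1).getD 0)) ∨
     (((PySem.List.pyGet? start 0).getD 0) = ((PySem.List.pyGet? dest 0).getD 0) ∧
      ((PySem.List.pyGet? start 1).getD 0) = ((PySem.List.pyGet? dest 1).getD 0)))) ∨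
   (((PySem.List.pyGet? dest 0).getD 0) ≤ ((PySem.List.pyGet? start 0).getD 0) ∧
    ((PySem.List.pyGet? dest 1).getD 0) ≤ ((PySem.List.pyGet? start 1).getD 0) ∧
    -(elevation_map.length : Int) ≤ ((PySem.List.pyGet? dest 0).getD 0) ∧
    ((PySem.List.pyGet? start 0).getD 0) < (elevation_map.length : Int) ∧
    (List.range ((((PySem.List.pyGet? start 0).getD 0) - ((PySem.List.pyGet? dest 0).getD 0)).toNat + 1)).all
      (fun k =>
        match PySem.List.pyGet? elevation_map (((PySem.List.pyGet? dest 0).getD 0) + (k : Int)) with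
        | some row => decide (-(row.length : Int) ≤ ((PySem.List.pyGet? dest 1).getD 0) ∧
                              ((PySem.List.pyGet? start 1).getD 0) < (row.length : Int))
        | none => false) = true))
instance (elevation_map : List (List Int)) (start : List Int) (dest : List Int) (supplies : Int) : Decidable (Pre_can_hike_to elevation_map start dest supplies) := by unfold Pre_can_hike_to; infer_instance

def pvWitness_can_hike_to : List (List Int) × List Int × List Int × Int :=
  ([[1, 6], [2, 5]], [1, 1], [0, 0], 10)

def Spec_can_hike_to (elevation_map : List (List Int)) (start : List Int) (dest : List Int) (supplies : Int) (out : Bool) : Prop := out = can_hike_to_alt elevation_map start dest supplies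
instance (elevation_map : List (List Int)) (start : List Int) (dest : List Int) (supplies : Int) (out : Bool) : Decidable (Spec_can_hike_to elevation_map start dest supplies out) := by unfold Spec_can_hike_to; infer_instance

-- ===== CLAIM =====
def Claim_equal_can_hike_to : Prop := ∀ (elevation_map : List (List Int)) (start : List Int) (dest : List Int) (supplies : Int), Dom_can_hike_to elevation_map start dest supplies → Pre_can_hike_to elevation_map start dest supplies → Spec_can_hike_to elevation_map start dest supplies (can_hike_to elevation_map start dest supplies)

-- ===== LEMMAS AND PROOFS =====

theorem aLoop1_stop (m : List (List Int)) (d0 d1 : Int) (f : Nat) (i j s : Int)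
    (h : ¬(i > d0 ∧ j > d1)) : aLoop1 m d0 d1 f i j s = (i, j, s) := by
  cases f <;> simp [aLoop1, h]

-- no-move corner: every branch of bCost is closed
theorem bCost_stop (m : List (List Int)) (d0 d1 : Int) (f : Nat) (i j : Int)
    (hg : ¬(i > d0 ∧ j > d1)) (hi : i ≠ d0) (hj : j ≠ d1) :
    bCost m d0 d1 f i j = 0 := by
  cases f <;> simp [bCost, hg, hi, hj]

-- westward straight run: bCost at row d0 equals what A's loop2 subtracts
theorem westL (m : List (List Int)) (d0 d1 : Int) :
    ∀ (n f : Nat) (j s : Int), j = d1 + (n : Int) → n ≤ f →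
      bCost m d0 d1 f d0 j = s - (aLoop2 m d1 d0 n j s).2 := by
  intro n
  induction n with
  | zero =>
    intro f j s hj _
    subst hj
    cases f <;> simp [bCost, aLoop2]
  | succ n ih =>
    intro f j s hj hf
    have hne : j ≠ d1 := by omega
    obtain ⟨f', rfl⟩ : ∃ f', f = f' + 1 := ⟨f - 1, by omega⟩
    have hb : bCost m d0 d1 (f' + 1) d0 j
        = |getE m d0 (j - 1) - getE m d0 j| + bCost m d0 d1 f' d0 (j - 1) := by
      simp [bCost, hne]
    have ha : aLoop2 m d1 d0 (n + 1) j s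
        = aLoop2 m d1 d0 n (j - 1) (s - |getE m d0 (j - 1) - getE m d0 j|) := by
      simp [aLoop2, hne]
    rw [hb, ha, ih f' (j - 1) (s - |getE m d0 (j - 1) - getE m d0 j|) (by omega) (by omega)]
    ring

-- northward straight run: bCost at column d1 equals what A's loop3 subtracts
theorem northL (m : List (List Int)) (d0 d1 : Int) :
    ∀ (n f : Nat) (i s : Int), i = d0 + (n : Int) → n ≤ f →
      bCost m d0 d1 f i d1 = s - (aLoop3 m d0 d1 n i s).2 := by
  intro n
  induction n with
  | zero =>
    intro f i s hi _
    subst hi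
    cases f <;> simp [bCost, aLoop3]
  | succ n ih =>
    intro f i s hi hf
    have hne : i ≠ d0 := by omega
    obtain ⟨f', rfl⟩ : ∃ f', f = f' + 1 := ⟨f - 1, by omega⟩
    have hb : bCost m d0 d1 (f' + 1) i d1
        = |getE m (i - 1) d1 - getE m i d1| + bCost m d0 d1 f' (i - 1) d1 := by
      simp [bCost, hne]
    have ha : aLoop3 m d0 d1 (n + 1) i s
        = aLoop3 m d0 d1 n (i - 1) (s - |getE m (i - 1) d1 - getE m i d1|) := by
      simp [aLoop3, hne]
    rw [hb, ha, ih f' (i - 1) (s - |getE m (i - 1) d1 - getE m i d1|) (by omega) (by omega)]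
    ring

-- main invariant (NW case): B's recursive cost equals the total amount A's loops subtract
theorem mainL (m : List (List Int)) (d0 d1 : Int) :
    ∀ (f : Nat) (i j s : Int), d0 ≤ i → d1 ≤ j →
      (i - d0).toNat + (j - d1).toNat ≤ f →
      bCost m d0 d1 f i j =
        s - (let r := aLoop1 m d0 d1 f i j s
             if r.1 = d0 then (aLoop2 m d1 r.1 ((r.2.1 - d1).toNat) r.2.1 r.2.2).2
             else if r.2.1 = d1 then (aLoop3 m d0 r.2.1 ((r.1 - d0).toNat) r.1 r.2.2).2
             else r.2.2) := by
  intro f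
  induction f with
  | zero =>
    intro i j s hi hj hf
    have hi' : i = d0 := by omega
    have hj' : j = d1 := by omega
    subst hi'; subst hj'
    simp [bCost, aLoop1, aLoop2]
  | succ f ih =>
    intro i j s hi hj hf
    by_cases hg : i > d0 ∧ j > d1
    · by_cases hc : |getE m (i - 1) j| ≤ |getE m i (j - 1)|
      · have hb : bCost m d0 d1 (f + 1) i j
            = |getE m (i - 1) j - getE m i j| + bCost m d0 d1 f (i - 1) j := by
          simp [bCost, hg, hc]
        have ha : aLoop1 m d0 d1 (f + 1) i j s
            = aLoop1 m d0 d1 f (i - 1) j (s - |getE m (i - 1) j - getE m i j|) := by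
          simp [aLoop1, hg, hc]
        rw [hb, ha, ih (i - 1) j (s - |getE m (i - 1) j - getE m i j|) (by omega) hj (by omega)]
        ring
      · have hb : bCost m d0 d1 (f + 1) i j
            = |getE m i (j - 1) - getE m i j| + bCost m d0 d1 f i (j - 1) := by
          simp [bCost, hg, hc]
        have ha : aLoop1 m d0 d1 (f + 1) i j s
            = aLoop1 m d0 d1 f i (j - 1) (s - |getE m i (j - 1) - getE m i j|) := by
          simp [aLoop1, hg, hc]
        rw [hb, ha, ih i (j - 1) (s - |getE m i (j - 1) - getE m i j|) hi (by omega) (by omega)]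
        ring
    · rw [aLoop1_stop m d0 d1 (f + 1) i j s hg]
      simp only []
      by_cases hid : i = d0
      · rw [if_pos hid]
        subst hid
        exact westL m i d1 ((j - d1).toNat) (f + 1) j s (by omega) (by omega)
      · have hjd : j = d1 := by omega
        rw [if_neg hid, if_pos hjd]
        subst hjd
        exact northL m d0 j ((i - d0).toNat) (f + 1) i s (by omega) (by omega)

-- ===== VERDICT =====
theorem can_hike_to_spec : Claim_equal_can_hike_to := by
  intro m start dest supplies _ hpre
  obtain ⟨_, _, hcase⟩ := hpre
  unfold Spec_can_hike_to can_hike_to can_hike_to_alt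
  simp only []
  set i0 := ((PySem.List.pyGet? start 0).getD 0) with hi0
  set j0 := ((PySem.List.pyGet? start 1).getD 0) with hj0
  set d0 := ((PySem.List.pyGet? dest 0).getD 0) with hdd0
  set d1 := ((PySem.List.pyGet? dest 1).getD 0) with hdd1
  have hmm : (d0 ≤ i0 ∧ d1 ≤ j0) ∨ (¬(i0 > d0 ∧ j0 > d1) ∧ i0 ≠ d0 ∧ j0 ≠ d1) := by
    rcases hcase with ⟨hng, hor⟩ | ⟨h1, h2, _⟩
    · rcases hor with ⟨hne1, hne2⟩ | ⟨he1, he2⟩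
      · exact Or.inr ⟨by omega, hne1, hne2⟩
      · exact Or.inl ⟨by omega, by omega⟩
    · exact Or.inl ⟨h1, h2⟩
  rcases hmm with ⟨hd0, hd1⟩ | ⟨hg, hne1, hne2⟩
  · have hmain := mainL m d0 d1 ((i0 - d0).toNat + (j0 - d1).toNat) i0 j0 supplies hd0 hd1 (le_refl _)
    simp only [] at hmain
    set r := aLoop1 m d0 d1 ((i0 - d0).toNat + (j0 - d1).toNat) i0 j0 supplies with hr
    by_cases hid : r.1 = d0
    · rw [if_pos hid] at hmain ⊢
      rw [hmain]
      simp only [decide_eq_decide]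
      omega
    · rw [if_neg hid] at hmain ⊢
      by_cases hjd : r.2.1 = d1
      · rw [if_pos hjd] at hmain ⊢
        rw [hmain]
        simp only [decide_eq_decide]
        omega
      · rw [if_neg hjd] at hmain ⊢
        rw [hmain]
        simp only [decide_eq_decide]
        omega
  · rw [aLoop1_stop m d0 d1 _ i0 j0 supplies hg,
        bCost_stop m d0 d1 _ i0 j0 hg hne1 hne2]
    simp only [if_neg hne1, if_neg hne2]
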